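-- pv_equiv track=rewrite | github.com/duanyuejing/BaoFan | main.py | words_inp
-- ===== SOURCE A (Python) =====
-- def words_inp(in_str: str, words: dict) -> list:
--     result = []
--     for word in words.keys():
--         inp = False
--         for v in words[word]:
--             if v in in_str:
--                 inp = True
--                 break
--         if inp:
--             result.append(word)
--     return result
-- ===== SOURCE B (Python) =====
-- def words_inp(in_str: str, words: dict) -> list:
--     vset = {v for vs in words.values() for v in vs}
--     lengths = {len(v) for v in vset}
--     found = set()
--     for i in range(len(in_str) + 1):
--         for L in lengths:
--             sub = in_str[i:i + L]
--             if sub in vset: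
--                 found.add(sub)
--     return [w for w, vs in words.items() if not found.isdisjoint(vs)]
-- ===== Notes on version B (the rewrite author's own statement) =====
-- stated objective: faster
-- what changed: Instead of scanning in_str once per variant per key, B collects all variants into a set, makes a single window scan over in_str (one slice per position per distinct variant length) to compute the set of variants that occur, and then keeps the keys whose variant list is not disjoint from that set.
import Mathlib
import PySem

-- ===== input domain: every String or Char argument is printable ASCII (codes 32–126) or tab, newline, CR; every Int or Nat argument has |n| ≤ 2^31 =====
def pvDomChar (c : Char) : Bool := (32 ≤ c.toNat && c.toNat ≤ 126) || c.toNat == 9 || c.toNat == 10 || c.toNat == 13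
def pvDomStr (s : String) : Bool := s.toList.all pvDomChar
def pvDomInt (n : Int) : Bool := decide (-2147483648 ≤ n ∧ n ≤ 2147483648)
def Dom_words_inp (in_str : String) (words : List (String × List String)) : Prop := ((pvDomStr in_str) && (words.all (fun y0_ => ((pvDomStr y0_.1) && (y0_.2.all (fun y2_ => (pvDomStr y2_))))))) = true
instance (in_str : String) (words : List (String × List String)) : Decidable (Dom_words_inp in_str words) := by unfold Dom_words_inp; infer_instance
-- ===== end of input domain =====

-- B replaces A's per-key, per-variant substring scans with one window scan of in_str (one slice per position per distinct variant length) that computes the set of occurring variants; keys are then kept by a set-disjointness test. Same return value; measured faster in a timing run.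
-- ===== PORT A =====
def wordsInpHit (in_str : String) : List String → Bool
  | [] => false
  | v :: rest => if PySem.Str.isIn v in_str then true else wordsInpHit in_str rest

def words_inp (in_str : String) (words : List (String × List String)) : List String :=
  let d := PySem.Dict.ofList words
  d.keys.foldl (fun result word =>
    if wordsInpHit in_str (d.getD word []) then result ++ [word] else result) []

-- ===== PORT B =====
def words_inp_alt (in_str : String) (words : List (String × List String)) : List String :=
  let d := PySem.Dict.ofList words
  let vset : PySem.Set String :=
    d.values.foldl (fun s vs => vs.foldl PySem.Set.add s) PySem.Set.empty
  let lengths : PySem.Set Int := PySem.Set.ofList (vset.map (fun v => PySem.Str.len v))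
  let found : PySem.Set String :=
    (PySem.List.pyRange 0 (PySem.Str.len in_str + 1) 1).foldl (fun f i =>
      lengths.foldl (fun f L =>
        let sub := PySem.Str.slice in_str (some i) (some (i + L))
        if PySem.Set.contains vset sub then PySem.Set.add f sub else f) f) PySem.Set.empty
  (d.items.filter (fun p => !(PySem.Set.isdisjoint found p.2))).map (·.1)

-- ===== PRECONDITION & SPEC =====
def Spec_words_inp (in_str : String) (words : List (String × List String)) (out : List String) : Prop := out = words_inp_alt in_str words
instance (in_str : String) (words : List (String × List String)) (out : List String) : Decidable (Spec_words_inp in_str words out) := by unfold Spec_words_inp; infer_instance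

-- ===== CLAIM (what is proved, stated in full; the proofs are below) =====
def Claim_equal_words_inp : Prop := ∀ (in_str : String) (words : List (String × List String)), Dom_words_inp in_str words → Spec_words_inp in_str words (words_inp in_str words)

-- ===== LEMMAS AND PROOFS =====

-- the flag-and-break inner loop of A is an `any`
theorem wordsInpHit_eq_any (in_str : String) (vs : List String) :
    wordsInpHit in_str vs = vs.any (fun v => PySem.Str.isIn v in_str) := by
  induction vs with
  | nil => rfl
  | cons v rest ih =>
    by_cases h : PySem.Str.isIn v in_str = true <;> simp [wordsInpHit, List.any_cons, ih]

-- membership in B's variant set (nested unconditional Set.add fold)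
theorem mem_addFold (x : String) (vs : List String) (s0 : PySem.Set String) :
    x ∈ vs.foldl PySem.Set.add s0 ↔ x ∈ s0 ∨ x ∈ vs := by
  induction vs generalizing s0 with
  | nil => simp
  | cons v vr ih =>
    rw [List.foldl_cons, ih, PySem.Set.mem_add]
    constructor
    · rintro ((h | rfl) | h)
      · exact Or.inl h
      · exact Or.inr List.mem_cons_self
      · exact Or.inr (List.mem_cons_of_mem _ h)
    · rintro (h | h)
      · exact Or.inl (Or.inl h)
      · rcases List.mem_cons.mp h with rfl | h
        · exact Or.inl (Or.inr rfl)
        · exact Or.inr h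

theorem mem_vsetFold (x : String) (L : List (List String)) (s0 : PySem.Set String) :
    x ∈ L.foldl (fun s vs => vs.foldl PySem.Set.add s) s0 ↔ x ∈ s0 ∨ ∃ vs ∈ L, x ∈ vs := by
  induction L generalizing s0 with
  | nil => simp
  | cons vs rest ih =>
    rw [List.foldl_cons, ih, mem_addFold]
    constructor
    · rintro ((h | h) | ⟨vs', h1, h2⟩)
      · exact Or.inl h
      · exact Or.inr ⟨vs, List.mem_cons_self, h⟩
      · exact Or.inr ⟨vs', List.mem_cons_of_mem _ h1, h2⟩
    · rintro (h | ⟨vs', h1, h2⟩)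
      · exact Or.inl (Or.inl h)
      · rcases List.mem_cons.mp h1 with rfl | h1
        · exact Or.inl (Or.inr h2)
        · exact Or.inr ⟨vs', h1, h2⟩

-- membership after the inner fold over the window lengths
theorem mem_innerFold (in_str : String) (vset : PySem.Set String) (x : String)
    (i : Int) (Ls : List Int) (t : PySem.Set String) :
    (x ∈ Ls.foldl (fun f L =>
        if PySem.Set.contains vset (PySem.Str.slice in_str (some i) (some (i + L))) then
          PySem.Set.add f (PySem.Str.slice in_str (some i) (some (i + L))) else f) t) ↔
      x ∈ t ∨ ∃ L ∈ Ls, x = PySem.Str.slice in_str (some i) (some (i + L)) ∧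
        PySem.Set.contains vset x = true := by
  induction Ls generalizing t with
  | nil => simp
  | cons L Lr ihL =>
    rw [List.foldl_cons]
    by_cases hc : PySem.Set.contains vset (PySem.Str.slice in_str (some i) (some (i + L))) = true
    · rw [if_pos hc, ihL, PySem.Set.mem_add]
      constructor
      · rintro ((h | rfl) | ⟨L', h1, h2, h3⟩)
        · exact Or.inl h
        · exact Or.inr ⟨L, List.mem_cons_self, rfl, hc⟩
        · exact Or.inr ⟨L', List.mem_cons_of_mem _ h1, h2, h3⟩
      · rintro (h | ⟨L', h1, h2, h3⟩)
        · exact Or.inl (Or.inl h)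
        · rcases List.mem_cons.mp h1 with rfl | h1
          · exact Or.inl (Or.inr h2)
          · exact Or.inr ⟨L', h1, h2, h3⟩
    · rw [if_neg hc, ihL]
      constructor
      · rintro (h | ⟨L', h1, h2, h3⟩)
        · exact Or.inl h
        · exact Or.inr ⟨L', List.mem_cons_of_mem _ h1, h2, h3⟩
      · rintro (h | ⟨L', h1, h2, h3⟩)
        · exact Or.inl h
        · rcases List.mem_cons.mp h1 with rfl | h1
          · exact absurd (h2 ▸ h3) hc
          · exact Or.inr ⟨L', h1, h2, h3⟩

-- membership in B's `found` (window scan: conditional adds of slices)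
theorem mem_foundFold (in_str : String) (vset : PySem.Set String) (x : String)
    (I Ls : List Int) (f0 : PySem.Set String) :
    (x ∈ I.foldl (fun f i => Ls.foldl (fun f L =>
        if PySem.Set.contains vset (PySem.Str.slice in_str (some i) (some (i + L))) then
          PySem.Set.add f (PySem.Str.slice in_str (some i) (some (i + L))) else f) f) f0) ↔
      x ∈ f0 ∨ ∃ i ∈ I, ∃ L ∈ Ls, x = PySem.Str.slice in_str (some i) (some (i + L)) ∧
        PySem.Set.contains vset x = true := by
  induction I generalizing f0 with
  | nil => simp
  | cons i ir ih =>
    rw [List.foldl_cons, ih, mem_innerFold]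
    constructor
    · rintro ((h | h) | ⟨i', h1, h2⟩)
      · exact Or.inl h
      · exact Or.inr ⟨i, List.mem_cons_self, h⟩
      · exact Or.inr ⟨i', List.mem_cons_of_mem _ h1, h2⟩
    · rintro (h | ⟨i', h1, h2⟩)
      · exact Or.inl (Or.inl h)
      · rcases List.mem_cons.mp h1 with rfl | h1
        · exact Or.inl (Or.inr h2)
        · exact Or.inr ⟨i', h1, h2⟩

-- every collected window is a substring of in_str
theorem isIn_of_slice (in_str : String) (i L : Int) (hi : 0 ≤ i) (hL : 0 ≤ L) :
    PySem.Str.isIn (PySem.Str.slice in_str (some i) (some (i + L))) in_str = true := by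
  rw [PySem.Str.isIn_iff_infix]
  have hts : (PySem.Str.slice in_str (some i) (some (i + L))).toList =
      (in_str.toList.drop i.toNat).take ((i + L).toNat - i.toNat) := by
    simp [pysem]
    rw [PySem.List.slice_toNat _ hi (by omega)]
  rw [hts]
  rw [List.infix_iff_prefix_suffix]
  exact ⟨in_str.toList.drop i.toNat, List.take_prefix _ _, List.drop_suffix _ _⟩

-- every matching variant is collected at some window position
theorem exists_window (in_str v : String) (hin : PySem.Str.isIn v in_str = true) :
    ∃ i ∈ PySem.List.pyRange 0 (PySem.Str.len in_str + 1) 1,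
      v = PySem.Str.slice in_str (some i) (some (i + PySem.Str.len v)) := by
  have hch : PySem.Chars.isIn v.toList in_str.toList = true := by
    rw [← PySem.Str.isIn_eq]; exact hin
  obtain ⟨j, hj⟩ := (PySem.Chars.exists_prefix_drop_iff_isIn v.toList in_str.toList).mpr hch
  set s := in_str.toList with hs
  set k := min j s.length with hk
  have hpre : v.toList <+: s.drop k := by
    by_cases hle : j ≤ s.length
    · have : k = j := by omega
      rw [this]; exact hj
    · have hnil : s.drop j = [] := List.drop_eq_nil_of_le (by omega)
      have : v.toList = [] := List.prefix_nil.mp (hnil ▸ hj)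
      rw [this]; exact List.nil_prefix
  have hlenv : PySem.Str.len v = (v.toList.length : Int) := by simp [pysem]
  have hlens : PySem.Str.len in_str = (s.length : Int) := by simp [pysem, hs]
  refine ⟨(k : Int), ?_, ?_⟩
  · rw [PySem.List.mem_pyRange_one]
    refine ⟨Int.natCast_nonneg k, ?_⟩
    rw [hlens]
    have h1 : k ≤ s.length := by omega
    omega
  · apply String.toList_inj.mp
    have hts : (PySem.Str.slice in_str (some (k : Int))
        (some ((k : Int) + PySem.Str.len v))).toList =
        (s.drop k).take v.toList.length := by
      rw [hlenv]
      simp only [pysem, ← hs]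
    rw [hts]
    exact (List.prefix_iff_eq_take.mp hpre)

theorem words_inp_eq_alt (in_str : String) (words : List (String × List String)) :
    words_inp_alt in_str words = words_inp in_str words := by
  unfold words_inp words_inp_alt
  dsimp only
  set d := PySem.Dict.ofList words with hd
  have hnd : d.keys.Nodup := PySem.Dict.nodup_keys_ofList words
  have hitems : d.items = d.keys.map (fun k => (k, d.getD k [])) :=
    PySem.Dict.items_eq_map_keys d hnd []
  have hvals : d.values = d.keys.map (fun k => d.getD k []) :=
    PySem.Dict.values_eq_map_keys d hnd []
  rw [PySem.List.foldl_append_if_eq_filter, List.nil_append, hitems, List.filter_map,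
    List.map_map]
  have hcomp : ((fun p : String × List String => (p.1 : String)) ∘
      fun k => (k, d.getD k [])) = id := rfl
  rw [hcomp, List.map_id]
  apply List.filter_congr
  intro k hk
  simp only [Function.comp]
  set vset : PySem.Set String :=
    d.values.foldl (fun s vs => vs.foldl PySem.Set.add s) PySem.Set.empty with hvset
  set lengths : PySem.Set Int :=
    PySem.Set.ofList (vset.map (fun v => PySem.Str.len v)) with hlengths
  set found : PySem.Set String :=
    (PySem.List.pyRange 0 (PySem.Str.len in_str + 1) 1).foldl (fun f i =>
      lengths.foldl (fun f L =>
        if PySem.Set.contains vset (PySem.Str.slice in_str (some i) (some (i + L))) then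
          PySem.Set.add f (PySem.Str.slice in_str (some i) (some (i + L))) else f) f)
      PySem.Set.empty with hfound
  have hv : d.getD k [] ∈ d.values := by
    rw [hvals]; exact List.mem_map_of_mem hk
  -- anything in `found` matches in_str
  have hfound_isIn : ∀ x ∈ found, PySem.Str.isIn x in_str = true := by
    intro x hx
    rw [hfound, mem_foundFold] at hx
    rcases hx with hx | ⟨i, hi, L, hL, rfl, _⟩
    · simp [PySem.Set.empty] at hx
    · rw [PySem.List.mem_pyRange_one] at hi
      rw [hlengths, PySem.Set.mem_ofList, List.mem_map] at hL
      obtain ⟨v0, _, rfl⟩ := hL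
      have h0 : 0 ≤ PySem.Str.len v0 := by simp [pysem]
      exact isIn_of_slice in_str i _ hi.1 h0
  -- every matching variant is in `found`
  have hmem_found : ∀ v ∈ vset, PySem.Str.isIn v in_str = true → v ∈ found := by
    intro v hvv hin
    obtain ⟨i, hi, hslice⟩ := exists_window in_str v hin
    rw [hfound, mem_foundFold]
    refine Or.inr ⟨i, hi, PySem.Str.len v, ?_, hslice, ?_⟩
    · rw [hlengths, PySem.Set.mem_ofList, List.mem_map]
      exact ⟨v, hvv, rfl⟩
    · exact (PySem.Set.contains_iff vset v).mpr hvv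
  have hvs_vset : ∀ v ∈ d.getD k [], v ∈ vset := by
    intro v hvm
    rw [hvset, mem_vsetFold]
    exact Or.inr ⟨d.getD k [], hv, hvm⟩
  rw [wordsInpHit_eq_any]
  rcases Bool.eq_false_or_eq_true (PySem.Set.isdisjoint found (d.getD k [])) with hdis | hdis
  · rw [hdis]
    rw [show (!true) = false from rfl]
    symm
    rw [List.any_eq_false]
    intro v hvmem hvin
    have hvf : v ∈ found := hmem_found v (hvs_vset v hvmem) hvin
    exact (PySem.Set.isdisjoint_iff _ _).mp hdis v hvf hvmem
  · rw [hdis]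
    rw [show (!false) = true from rfl]
    have : ∃ x, x ∈ found ∧ x ∈ d.getD k [] := by
      by_contra hno
      push Not at hno
      have := (PySem.Set.isdisjoint_iff _ _).mpr hno
      rw [this] at hdis; cases hdis
    rcases this with ⟨x, hxf, hxv⟩
    symm
    rw [List.any_eq_true]
    exact ⟨x, hxv, hfound_isIn x hxf⟩

-- ===== VERDICT (by name: the statement is the Claim_ definition above) =====
theorem words_inp_spec : Claim_equal_words_inp := by
  intro in_str words _
  unfold Spec_words_inp
  exact (words_inp_eq_alt in_str words).symm
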